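-- pv_equiv track=rewrite | github.com/kaluginpeter/Algorithms_and_structures_tasks | Python_Solutions/Codeforces/158B._Taxi.py | solution
-- ===== SOURCE A (Python) =====
-- def solution(n: int, groups: list) -> str:
--     groups.sort()
--     taxes: int = 0
--     left_pointer: int = 0
--     right_pointer: int = n - 1
--     while left_pointer <= right_pointer:
--         total_passengers: int = groups[right_pointer]
--         while left_pointer < right_pointer and total_passengers + groups[left_pointer] <= 4:
--             total_passengers += groups[left_pointer]
--             left_pointer += 1
--         right_pointer -= 1
--         taxes += 1
--     return str(taxes)
-- ===== SOURCE B (Python) =====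
-- def solution(n: int, groups: list) -> str:
--     if n <= 0:
--         return "0"
--     desc = sorted(groups)[:n]
--     desc.reverse()  # largest group first; small groups sit at the tail
--     taxis = 0
--     i = 0  # index of the next seed group (largest not yet seated)
--     while i < len(desc):
--         cap = 4 - desc[i]  # remaining capacity of this taxi
--         i += 1
--         while i < len(desc) and desc[-1] <= cap:
--             cap -= desc.pop()
--         taxis += 1
--     return str(taxis)
-- ===== Notes on version B (the rewrite author's own statement) =====
-- stated objective: alternative
-- what changed: Same greedy seating restated over the opposite traversal: B takes the n smallest groups, reverses them to descending order, walks taxi seeds forward by index and absorbs small groups by O(1) pops from the list tail against a remaining-capacity counter, instead of A's two index pointers converging on the ascending in-place-sorted list with a passenger total; B also does not mutate its argument.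
import Mathlib
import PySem

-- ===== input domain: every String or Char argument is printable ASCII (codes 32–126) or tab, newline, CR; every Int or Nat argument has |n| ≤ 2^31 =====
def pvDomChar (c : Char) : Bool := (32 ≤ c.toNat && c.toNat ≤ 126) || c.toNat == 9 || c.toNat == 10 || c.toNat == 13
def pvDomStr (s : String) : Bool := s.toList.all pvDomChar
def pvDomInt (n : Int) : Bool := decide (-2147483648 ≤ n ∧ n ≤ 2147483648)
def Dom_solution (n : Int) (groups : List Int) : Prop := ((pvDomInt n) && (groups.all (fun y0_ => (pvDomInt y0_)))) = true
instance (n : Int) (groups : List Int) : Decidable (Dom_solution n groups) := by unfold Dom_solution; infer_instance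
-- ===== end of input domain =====

-- B restructures the same exact computation (equivalence is about the RETURN value: Python A sorts `groups`
-- in place, B leaves it untouched): seeds taxis by index over a DESCENDING list and absorbs small groups by
-- popping from the tail with a remaining-capacity counter, instead of A's two index pointers on the
-- ascending list with a passenger total; objective: alternative (no speed claim).

-- ===== PORT A =====
-- inner while: `while left_pointer < right_pointer and total_passengers + groups[left_pointer] <= 4`
-- (fuel makes the loop total; `r - l` steps always suffice, so the port computes exactly the Python loop)
def solutionAbsorb (xs : List Int) (fuel : Nat) (r l t : Int) : Int :=
  match fuel with
  | 0 => l
  | fuel + 1 =>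
    if l < r ∧ t + PySem.List.pyGetD xs l 0 ≤ 4 then
      solutionAbsorb xs fuel r (l + 1) (t + PySem.List.pyGetD xs l 0)
    else l

-- outer while: `while left_pointer <= right_pointer` (`r + 1 - l` steps always suffice)
def solutionLoop (xs : List Int) (fuel : Nat) (l r taxes : Int) : Int :=
  match fuel with
  | 0 => taxes
  | fuel + 1 =>
    if l ≤ r then
      solutionLoop xs fuel (solutionAbsorb xs (r - l).toNat r l (PySem.List.pyGetD xs r 0)) (r - 1) (taxes + 1)
    else taxes

def solution (n : Int) (groups : List Int) : String :=
  PySem.Int.toStr (solutionLoop (PySem.List.sorted groups (fun x => x) false) n.toNat 0 (n - 1) 0)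

-- ===== PORT B =====
-- inner while: `while i < len(desc) and desc[-1] <= cap: cap -= desc.pop()`
-- (fuel makes the loop total; `len(desc)` steps always suffice)
def solutionAltDrop (fuel : Nat) (i : Nat) (cap : Int) (ds : List Int) : List Int :=
  match fuel with
  | 0 => ds
  | fuel + 1 =>
    if i < ds.length ∧ PySem.List.pyGetD ds (-1) 0 ≤ cap then
      solutionAltDrop fuel i (cap - PySem.List.pyGetD ds (-1) 0) ds.dropLast
    else ds

-- outer while: `while i < len(desc)` (`len(desc)` steps always suffice)
def solutionAltLoop (fuel : Nat) (i : Nat) (ds : List Int) (taxis : Int) : Int :=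
  match fuel with
  | 0 => taxis
  | fuel + 1 =>
    if i < ds.length then
      solutionAltLoop fuel (i + 1)
        (solutionAltDrop ds.length (i + 1) (4 - PySem.List.pyGetD ds (i : Int) 0) ds) (taxis + 1)
    else taxis

def solution_alt (n : Int) (groups : List Int) : String :=
  if n ≤ 0 then "0"
  else
    PySem.Int.toStr (solutionAltLoop
      ((PySem.List.slice (PySem.List.sorted groups (fun x => x) false) none (some n)).reverse).length 0
      ((PySem.List.slice (PySem.List.sorted groups (fun x => x) false) none (some n)).reverse) 0)

-- ===== PRECONDITION & SPEC =====
-- Pre_ excludes exactly the inputs on which A raises IndexError: n larger than len(groups)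
-- (then groups[n-1] is read past the end). On every other input A returns and B matches it.
def Pre_solution (n : Int) (groups : List Int) : Prop := n ≤ (groups.length : Int)
instance (n : Int) (groups : List Int) : Decidable (Pre_solution n groups) := by
  unfold Pre_solution; infer_instance

def pvWitness_solution : Int × List Int := (4, [1, 2, 4, 3])

def Spec_solution (n : Int) (groups : List Int) (out : String) : Prop := out = solution_alt n groups
instance (n : Int) (groups : List Int) (out : String) : Decidable (Spec_solution n groups out) := by
  unfold Spec_solution; infer_instance

-- ===== CLAIM (what is proved, stated in full; the proofs are below) =====
def Claim_equal_solution : Prop := ∀ (n : Int) (groups : List Int), Dom_solution n groups → Pre_solution n groups → Spec_solution n groups (solution n groups)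

-- ===== LEMMAS AND PROOFS =====

theorem pv_len (xs : List Int) (N l : Nat) (hN : N ≤ xs.length) :
    (((xs.take N).drop l).reverse).length = N - l := by
  simp; omega

theorem pv_get_last (xs : List Int) (N l : Nat) (hN : N ≤ xs.length) (hl : l < N) :
    PySem.List.pyGetD (((xs.take N).drop l).reverse) (-1) 0 = PySem.List.pyGetD xs (l : Int) 0 := by
  have hne : ((xs.take N).drop l) ≠ [] := by
    simp [List.drop_eq_nil_iff]; omega
  rw [PySem.List.pyGetD_neg_one _ _ (by simpa using hne)]
  rw [List.getLast_reverse]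
  rw [List.head_drop]
  rw [List.getElem_take]
  rw [PySem.List.pyGetD_natCast]
  rw [List.getD_eq_getElem _ _ (by omega)]

theorem pv_get_seed (xs : List Int) (N l i : Nat) (hN : N ≤ xs.length) (h : l + i < N) :
    PySem.List.pyGetD (((xs.take N).drop l).reverse) (i : Int) 0
      = PySem.List.pyGetD xs ((N : Int) - 1 - (i : Int)) 0 := by
  rw [PySem.List.pyGetD_natCast]
  rw [List.getD_eq_getElem _ _ (by simp; omega)]
  rw [PySem.List.pyGetD_eq_getElem xs 0 (by omega) (by omega)]
  rw [List.getElem_reverse]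
  rw [List.getElem_drop]
  rw [List.getElem_take]
  congr 1
  simp
  omega

-- One absorption round: A's inner pointer walk from l equals B's tail-popping on the
-- reversed window, and both leave corresponding states (with any sufficient fuels).
theorem absorb_eq (xs : List Int) (N : Nat) (hN : N ≤ xs.length)
    (l i : Nat) (t : Int) (hli : l + i < N) (fA fB : Nat)
    (hfA : N ≤ fA + l + i + 1) (hfB : N ≤ fB + l) :
    ∃ l' : Nat, l ≤ l' ∧ l' + i < N ∧
      solutionAbsorb xs fA ((N : Int) - 1 - (i : Int)) (l : Int) t = (l' : Int) ∧
      solutionAltDrop fB (i + 1) (4 - t) (((xs.take N).drop l).reverse)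
        = ((xs.take N).drop l').reverse := by
  have hlast := pv_get_last xs N l hN (by omega)
  have hlen := pv_len xs N l hN
  by_cases hc : (l : Int) < (N : Int) - 1 - (i : Int) ∧ t + PySem.List.pyGetD xs (l : Int) 0 ≤ 4
  · obtain ⟨fA', rfl⟩ : ∃ f, fA = f + 1 := ⟨fA - 1, by omega⟩
    obtain ⟨fB', rfl⟩ : ∃ f, fB = f + 1 := ⟨fB - 1, by omega⟩
    obtain ⟨l', h1, h2, h3, h4⟩ :=
      absorb_eq xs N hN (l + 1) i (t + PySem.List.pyGetD xs (l : Int) 0) (by omega)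
        fA' fB' (by omega) (by omega)
    push_cast at h3
    refine ⟨l', by omega, h2, ?_, ?_⟩
    · rw [solutionAbsorb]
      rw [if_pos hc]
      exact h3
    · rw [solutionAltDrop]
      rw [if_pos ⟨by rw [hlen]; omega, by rw [hlast]; omega⟩]
      rw [hlast]
      rw [List.dropLast_reverse, List.tail_drop]
      rw [show 4 - t - PySem.List.pyGetD xs (l : Int) 0
            = 4 - (t + PySem.List.pyGetD xs (l : Int) 0) by ring]
      exact h4
  · have hg : ¬ (i + 1 < (((xs.take N).drop l).reverse).length ∧
        PySem.List.pyGetD (((xs.take N).drop l).reverse) (-1) 0 ≤ 4 - t) := by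
      rintro ⟨g1, g2⟩
      rw [hlen] at g1
      rw [hlast] at g2
      exact hc ⟨by omega, by omega⟩
    refine ⟨l, le_refl l, hli, ?_, ?_⟩
    · cases fA with
      | zero => rw [solutionAbsorb]
      | succ f => rw [solutionAbsorb, if_neg hc]
    · cases fB with
      | zero => rw [solutionAltDrop]
      | succ f => rw [solutionAltDrop, if_neg hg]
termination_by N - l

-- The two outer loops agree on corresponding states (with any sufficient fuels).
theorem loop_eq (xs : List Int) (N : Nat) (hN : N ≤ xs.length)
    (l i : Nat) (taxes : Int) (hli : l + i ≤ N) (fA fB : Nat)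
    (hfA : N ≤ fA + l + i) (hfB : N ≤ fB + l + i) :
    solutionLoop xs fA (l : Int) ((N : Int) - 1 - (i : Int)) taxes
      = solutionAltLoop fB i (((xs.take N).drop l).reverse) taxes := by
  have hlen := pv_len xs N l hN
  by_cases hc : l + i < N
  · have hseed := pv_get_seed xs N l i hN hc
    obtain ⟨fA', rfl⟩ : ∃ f, fA = f + 1 := ⟨fA - 1, by omega⟩
    obtain ⟨fB', rfl⟩ : ∃ f, fB = f + 1 := ⟨fB - 1, by omega⟩
    obtain ⟨l', h1, h2, h3, h4⟩ :=
      absorb_eq xs N hN l i (PySem.List.pyGetD xs ((N : Int) - 1 - (i : Int)) 0) hc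
        ((N : Int) - 1 - (i : Int) - (l : Int)).toNat (((xs.take N).drop l).reverse).length
        (by omega) (by rw [hlen]; omega)
    have IH := loop_eq xs N hN l' (i + 1) (taxes + 1) (by omega) fA' fB' (by omega) (by omega)
    rw [solutionLoop]
    rw [if_pos (by omega : (l : Int) ≤ (N : Int) - 1 - (i : Int))]
    rw [h3]
    conv_rhs => rw [solutionAltLoop]
    rw [if_pos (by rw [hlen]; omega : i < (((xs.take N).drop l).reverse).length)]
    rw [hseed, h4]
    rw [show (N : Int) - 1 - (i : Int) - 1 = (N : Int) - 1 - ((i + 1 : Nat) : Int) by push_cast; ring]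
    exact IH
  · have hA : ¬ (l : Int) ≤ (N : Int) - 1 - (i : Int) := by omega
    have hB : ¬ i < (((xs.take N).drop l).reverse).length := by rw [hlen]; omega
    cases fA with
    | zero =>
      cases fB with
      | zero => rw [solutionLoop, solutionAltLoop]
      | succ f => rw [solutionLoop, solutionAltLoop, if_neg hB]
    | succ f =>
      cases fB with
      | zero => rw [solutionLoop, solutionAltLoop, if_neg hA]
      | succ g => rw [solutionLoop, solutionAltLoop, if_neg hA, if_neg hB]
termination_by N - (l + i)
decreasing_by omega

-- ===== VERDICT (by name: the statement is the Claim_ definition above) =====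
theorem solution_spec : Claim_equal_solution := by
  unfold Claim_equal_solution
  intro n groups _hdom hpre
  unfold Pre_solution at hpre
  unfold Spec_solution solution solution_alt
  by_cases hn : n ≤ 0
  · rw [if_pos hn]
    rw [show n.toNat = 0 by omega]
    rw [solutionLoop]
    decide
  · rw [if_neg hn]
    have hlenxs : (PySem.List.sorted groups (fun x => x) false).length = groups.length :=
      PySem.List.length_sorted groups (fun x => x) false
    have hN : n.toNat ≤ (PySem.List.sorted groups (fun x => x) false).length := by
      rw [hlenxs]; omega
    have hs : PySem.List.slice (PySem.List.sorted groups (fun x => x) false) none (some n)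
        = (PySem.List.sorted groups (fun x => x) false).take n.toNat := by
      conv_lhs => rw [show n = ((n.toNat : Nat) : Int) by omega]
      exact PySem.List.slice_to_natCast _ n.toNat
    rw [hs]
    have h := loop_eq (PySem.List.sorted groups (fun x => x) false) n.toNat hN 0 0 0 (by omega)
      n.toNat (((PySem.List.sorted groups (fun x => x) false).take n.toNat).reverse).length
      (by omega) (by simp; omega)
    simp only [Nat.cast_zero, List.drop_zero] at h
    rw [show ((n.toNat : Nat) : Int) - 1 - 0 = n - 1 by omega] at h
    exact congrArg PySem.Int.toStr h
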